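-- pv_equiv track=rewrite | github.com/mapacheverdugo/back-office-karukelen | main.py | separarSeccionInventario
-- ===== SOURCE A (Python) =====
-- def separarSeccionInventario(listaDeLineas):
--     secciones = []
--     seccion = []
--     for linea in listaDeLineas:
--         if (linea == '-'):
--             secciones.append(seccion)
--             seccion = []
--         else:
--             seccion.append(linea)
--     return secciones
-- ===== SOURCE B (Python) =====
-- def separarSeccionInventario(listaDeLineas):
--     posiciones = [i for i, linea in enumerate(listaDeLineas) if linea == '-']
--     secciones = []
--     prev = 0
--     for p in posiciones:
--         secciones.append(listaDeLineas[prev:p])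
--         prev = p + 1
--     return secciones
-- ===== Notes on version B (the rewrite author's own statement) =====
-- stated objective: alternative
-- what changed: B first collects the indices of all '-' delimiters with enumerate and then slices the input between consecutive delimiter boundaries, instead of A's single accumulator loop that grows the current section element by element.
import Mathlib
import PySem

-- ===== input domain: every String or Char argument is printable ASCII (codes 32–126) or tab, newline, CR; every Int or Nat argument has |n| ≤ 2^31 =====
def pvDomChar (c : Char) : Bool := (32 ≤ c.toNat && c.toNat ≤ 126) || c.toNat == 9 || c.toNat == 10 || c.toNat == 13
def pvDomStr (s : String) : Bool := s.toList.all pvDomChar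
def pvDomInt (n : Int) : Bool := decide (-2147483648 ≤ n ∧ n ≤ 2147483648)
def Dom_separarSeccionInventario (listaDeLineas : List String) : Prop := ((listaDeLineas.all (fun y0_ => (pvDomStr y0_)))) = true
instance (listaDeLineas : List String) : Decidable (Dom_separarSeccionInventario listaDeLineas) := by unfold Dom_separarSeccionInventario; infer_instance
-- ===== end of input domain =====

-- B collects the indices of all '-' delimiters first and then slices the input between
-- consecutive delimiter boundaries (alternative decomposition; same return value as A).

-- ===== PORT A =====
-- A's loop body: state = (secciones, seccion)
def pvStepA (st : List (List String) × List String) (linea : String) :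
    List (List String) × List String :=
  if linea = "-" then (st.1 ++ [st.2], []) else (st.1, st.2 ++ [linea])

def separarSeccionInventario (listaDeLineas : List String) : List (List String) :=
  (listaDeLineas.foldl pvStepA ([], [])).1

-- ===== PORT B =====
-- B's loop body: state = (secciones, prev)
def pvStepB (listaDeLineas : List String) (st : List (List String) × Int) (p : Int) :
    List (List String) × Int :=
  (st.1 ++ [PySem.List.slice listaDeLineas (some st.2) (some p)], p + 1)

def separarSeccionInventario_alt (listaDeLineas : List String) : List (List String) :=
  let posiciones :=
    ((PySem.List.enumerate listaDeLineas 0).filter (fun q => q.2 == "-")).map (·.1)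
  (posiciones.foldl (pvStepB listaDeLineas) ([], 0)).1

-- ===== PRECONDITION & SPEC =====
def Spec_separarSeccionInventario (listaDeLineas : List String) (out : List (List String)) : Prop := out = separarSeccionInventario_alt listaDeLineas
instance (listaDeLineas : List String) (out : List (List String)) : Decidable (Spec_separarSeccionInventario listaDeLineas out) := by unfold Spec_separarSeccionInventario; infer_instance

-- ===== CLAIM (what is proved, stated in full; the proofs are below) =====
def Claim_equal_separarSeccionInventario : Prop := ∀ (listaDeLineas : List String), Dom_separarSeccionInventario listaDeLineas → Spec_separarSeccionInventario listaDeLineas (separarSeccionInventario listaDeLineas)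

-- ===== LEMMAS AND PROOFS =====

-- common specification: sections of l, given the partial current section sec
def pvSections (sec : List String) : List String → List (List String)
  | [] => []
  | x :: xs => if x = "-" then sec :: pvSections [] xs else pvSections (sec ++ [x]) xs

lemma pvA_loop (l : List String) : ∀ (secs : List (List String)) (sec : List String),
    (l.foldl pvStepA (secs, sec)).1 = secs ++ pvSections sec l := by
  induction l with
  | nil => intro secs sec; simp [pvSections]
  | cons x xs ih =>
    intro secs sec
    by_cases hx : x = "-" <;>
      simp [pvStepA, pvSections, hx, ih]

lemma pvSlice_extend (L : List String) (prev k : Nat) (x : String) (xs : List String)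
    (hpk : prev ≤ k) (hd : L.drop k = x :: xs) :
    PySem.List.slice L (some ((prev : Nat) : Int)) (some (((k + 1 : Nat)) : Int)) =
      PySem.List.slice L (some ((prev : Nat) : Int)) (some ((k : Nat) : Int)) ++ [x] := by
  have hk : k < L.length := by
    by_contra h
    have : L.drop k = [] := List.drop_eq_nil_of_le (by omega)
    simp [this] at hd
  have hget : L[k]'hk = x := by
    have := congrArg (fun t => t[0]?) hd
    simpa [List.getElem?_drop, List.getElem?_eq_getElem hk] using this
  rw [PySem.List.slice_natCast, PySem.List.slice_natCast]
  have h1 : k + 1 - prev = (k - prev) + 1 := by omega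
  rw [h1, List.take_add_one]
  congr 1
  have : (L.drop prev)[k - prev]? = some x := by
    rw [List.getElem?_drop]
    have : prev + (k - prev) = k := by omega
    rw [this, List.getElem?_eq_getElem hk, hget]
  simp [this]

lemma pvB_loop (L : List String) : ∀ (l : List String) (k prev : Nat)
    (acc : List (List String)), prev ≤ k → L.drop k = l →
    ((((PySem.List.enumerate l ((k : Nat) : Int)).filter (fun q => q.2 == "-")).map
        (·.1)).foldl (pvStepB L) (acc, ((prev : Nat) : Int))).1 =
      acc ++ pvSections (PySem.List.slice L (some ((prev : Nat) : Int)) (some ((k : Nat) : Int))) l := by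
  intro l
  induction l with
  | nil => intro k prev acc _ _; simp [PySem.List.enumerate_nil, pvSections]
  | cons x xs ih =>
    intro k prev acc hpk hd
    have hd' : L.drop (k + 1) = xs := by
      have h := congrArg List.tail hd
      rw [List.tail_drop] at h
      simpa using h
    have hkk : ((k : Nat) : Int) + 1 = (((k + 1 : Nat)) : Int) := by push_cast; ring
    rw [PySem.List.enumerate_cons, hkk]
    by_cases hx : x = "-"
    · rw [show List.filter (fun q => q.2 == "-")
            ((((k : Nat) : Int), x) :: PySem.List.enumerate xs (((k + 1 : Nat)) : Int)) =
            (((k : Nat) : Int), x) ::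
              List.filter (fun q => q.2 == "-") (PySem.List.enumerate xs (((k + 1 : Nat)) : Int))
          from by simp [hx]]
      rw [List.map_cons, List.foldl_cons]
      rw [show pvStepB L (acc, ((prev : Nat) : Int)) ((k : Nat) : Int) =
            (acc ++ [PySem.List.slice L (some ((prev : Nat) : Int)) (some ((k : Nat) : Int))],
             ((k : Nat) : Int) + 1) from rfl, hkk]
      rw [ih (k + 1) (k + 1) _ (le_refl _) hd']
      have hempty : PySem.List.slice L (some (((k + 1 : Nat)) : Int)) (some (((k + 1 : Nat)) : Int)) = [] := by
        rw [PySem.List.slice_natCast]; simp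
      rw [hempty]
      simp [pvSections, hx]
    · rw [show List.filter (fun q => q.2 == "-")
            ((((k : Nat) : Int), x) :: PySem.List.enumerate xs (((k + 1 : Nat)) : Int)) =
            List.filter (fun q => q.2 == "-") (PySem.List.enumerate xs (((k + 1 : Nat)) : Int))
          from by simp [hx]]
      rw [ih (k + 1) prev acc (by omega) hd']
      rw [pvSlice_extend L prev k x xs hpk hd]
      simp [pvSections, hx]

-- ===== VERDICT (by name: the statement is the Claim_ definition above) =====
theorem separarSeccionInventario_spec : Claim_equal_separarSeccionInventario := by
  intro l _
  unfold Spec_separarSeccionInventario separarSeccionInventario separarSeccionInventario_alt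
  rw [pvA_loop l [] []]
  have h := pvB_loop l l 0 0 [] (le_refl _) (by simp)
  have hz : PySem.List.slice l (some (((0 : Nat)) : Int)) (some (((0 : Nat)) : Int)) = [] := by
    rw [PySem.List.slice_natCast]; simp
  rw [hz] at h
  simpa using h.symm
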